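-- pv_equiv track=rewrite | github.com/MaxH297/euphemia-implementation | app/block_orders_reader.py | get_exclusive_groups
-- ===== SOURCE A (Python) =====
-- def get_exclusive_groups(blocks):
--     exclusive_groups = {}
--     blocks = [block for block in blocks if block['type'] == 'C04']
--     for block in blocks:
--         if(block['special_id'] in exclusive_groups):
--             exclusive_groups[block['special_id']].append(block['id'])
--         else:
--             exclusive_groups[block['special_id']] = [block['id']]
--     return exclusive_groups
-- ===== SOURCE B (Python) =====
-- def get_exclusive_groups(blocks):
--     # Recursive partitioning: peel off the first remaining special_id, take all its
--     # ids in one sweep, drop them, repeat. No dict membership tests, no dict growth.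
--     pairs = [(b['special_id'], b['id']) for b in blocks if b['type'] == 'C04']
--     out = {}
--     while pairs:
--         k = pairs[0][0]
--         out[k] = [i for (s, i) in pairs if s == k]
--         pairs = [(s, i) for (s, i) in pairs if s != k]
--     return out
-- ===== Notes on version B (the rewrite author's own statement) =====
-- stated objective: alternative
-- what changed: Replaces A's one-pass dict accumulation (membership test + append per element) by projecting to (special_id, id) pairs and repeatedly partitioning: take the first remaining key, collect its ids in one sweep, drop them, repeat; no dict is consulted during grouping.
import Mathlib
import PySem

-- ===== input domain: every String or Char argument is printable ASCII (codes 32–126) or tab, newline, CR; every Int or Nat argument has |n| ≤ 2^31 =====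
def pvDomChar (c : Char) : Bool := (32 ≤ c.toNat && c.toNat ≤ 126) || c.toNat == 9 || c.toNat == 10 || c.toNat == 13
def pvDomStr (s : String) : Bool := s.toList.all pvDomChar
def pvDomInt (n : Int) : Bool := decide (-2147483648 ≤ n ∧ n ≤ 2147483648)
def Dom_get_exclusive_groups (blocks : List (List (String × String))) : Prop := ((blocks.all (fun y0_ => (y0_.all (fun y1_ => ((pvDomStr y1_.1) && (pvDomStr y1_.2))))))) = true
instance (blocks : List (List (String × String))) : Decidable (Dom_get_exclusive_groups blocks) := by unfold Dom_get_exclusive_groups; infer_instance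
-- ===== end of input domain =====

-- B groups by repeated partitioning of the (special_id, id) pair list instead of A's
-- dict accumulation (objective: alternative decomposition, not faster). Return value only.

-- ===== PORT A =====
-- Missing keys ('type'; 'special_id'/'id' on a C04 block) raise KeyError in Python; those
-- inputs are excluded by Pre_ below, the port reads them with getD "" there.
def get_exclusive_groups (blocks : List (List (String × String))) : List (String × List String) :=
  let c04 := blocks.filter (fun b => (PySem.Dict.mk b).getD "type" "" == "C04")
  let eg := c04.foldl (fun eg b =>
      let sid := (PySem.Dict.mk b).getD "special_id" ""
      if eg.contains sid then
        -- exclusive_groups[sid].append(id): in-place append keeps the key's position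
        eg.insert sid (eg.getD sid [] ++ [(PySem.Dict.mk b).getD "id" ""])
      else
        eg.insert sid [(PySem.Dict.mk b).getD "id" ""])
    PySem.Dict.empty
  eg.items

-- ===== PORT B =====
-- the while loop of Source B: peel off the first remaining key, one group per iteration
def pvPeelGroups : List (String × String) → List (String × List String)
  | [] => []
  | p :: rest =>
      (p.1, ((p :: rest).filter (fun q => q.1 == p.1)).map Prod.snd) ::
        pvPeelGroups (rest.filter (fun q => !(q.1 == p.1)))
termination_by ps => ps.length
decreasing_by
  simp only [List.length_unattach, List.length_cons]
  exact Nat.lt_succ_of_le (le_trans (List.length_filter_le _ _) (by simp))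

def get_exclusive_groups_alt (blocks : List (List (String × String))) : List (String × List String) :=
  -- pairs = [(b['special_id'], b['id']) for b in blocks if b['type'] == 'C04']
  pvPeelGroups ((blocks.filter (fun b => (PySem.Dict.mk b).getD "type" "" == "C04")).map
    (fun b => ((PySem.Dict.mk b).getD "special_id" "", (PySem.Dict.mk b).getD "id" "")))

-- ===== PRECONDITION & SPEC =====
-- Pre_ excludes exactly the inputs where Python A raises KeyError: a block without a
-- 'type' key, or a 'C04' block missing 'special_id' or 'id' (B raises there too).
def Pre_get_exclusive_groups (blocks : List (List (String × String))) : Prop :=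
  ∀ b ∈ blocks, ((PySem.Dict.mk b).get? "type").isSome = true ∧
    ((PySem.Dict.mk b).getD "type" "" = "C04" →
      ((PySem.Dict.mk b).get? "special_id").isSome = true ∧
      ((PySem.Dict.mk b).get? "id").isSome = true)
instance (blocks : List (List (String × String))) : Decidable (Pre_get_exclusive_groups blocks) := by
  unfold Pre_get_exclusive_groups; infer_instance

def pvWitness_get_exclusive_groups : (List (List (String × String))) :=
  [[("type", "C04"), ("special_id", "g1"), ("id", "b1")],
   [("type", "C01"), ("id", "b2")],
   [("type", "C04"), ("special_id", "g1"), ("id", "b3")]]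

def Spec_get_exclusive_groups (blocks : List (List (String × String))) (out : List (String × List String)) : Prop := out = get_exclusive_groups_alt blocks
instance (blocks : List (List (String × String))) (out : List (String × List String)) : Decidable (Spec_get_exclusive_groups blocks out) := by unfold Spec_get_exclusive_groups; infer_instance

-- ===== CLAIM (what is proved, stated in full; the proofs are below) =====
def Claim_equal_get_exclusive_groups : Prop := ∀ (blocks : List (List (String × String))), Dom_get_exclusive_groups blocks → Pre_get_exclusive_groups blocks → Spec_get_exclusive_groups blocks (get_exclusive_groups blocks)

-- ===== LEMMAS AND PROOFS =====

-- filter commutes past filter (boolean && is symmetric elementwise)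
theorem filter_filter_comm {α : Type} (p q : α → Bool) (l : List α) :
    (l.filter p).filter q = (l.filter q).filter p := by
  rw [List.filter_filter, List.filter_filter]
  exact List.filter_congr (fun a _ => by cases p a <;> cases q a <;> rfl)

-- set(...) of a filtered list = filtered set of the list
theorem ofList_filter {α : Type} [BEq α] [LawfulBEq α] (P : α → Bool) (xs : List α) :
    PySem.Set.ofList (xs.filter P) = (PySem.Set.ofList xs).filter P := by
  induction xs with
  | nil => rfl
  | cons x xs ih =>
    rw [PySem.Set.ofList_cons, PySem.Set.discard]
    by_cases hx : P x = true
    · rw [List.filter_cons_of_pos hx, PySem.Set.ofList_cons, PySem.Set.discard, ih,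
        List.filter_cons_of_pos hx, filter_filter_comm]
    · rw [List.filter_cons_of_neg hx, ih, List.filter_cons_of_neg hx,
        List.filter_filter]
      exact (List.filter_congr (fun a _ => by
        by_cases h : P a = true
        · have : (a == x) = false := by
            refine beq_eq_false_iff_ne.mpr ?_
            intro he; rw [he] at h; exact hx h
          simp [h, this]
        · simp at h; simp [h])).symm

-- B characterised: pvPeelGroups lists the distinct keys in first-occurrence order,
-- each paired with all its values in order.
theorem pvPeelGroups_eq (l : List (String × String)) :
    pvPeelGroups l = (PySem.Set.ofList (l.map Prod.fst)).map
      (fun k => (k, (l.filter (fun q => q.1 == k)).map Prod.snd)) := by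
  induction hn : l.length using Nat.strong_induction_on generalizing l with
  | _ n ih =>
    match l with
    | [] => simp [pvPeelGroups]
    | p :: rest =>
      rw [pvPeelGroups]
      have hlt : (rest.filter (fun q => !(q.1 == p.1))).length < n := by
        subst hn
        exact Nat.lt_succ_of_le (List.length_filter_le _ _)
      rw [ih _ hlt (rest.filter (fun q => !(q.1 == p.1))) rfl]
      rw [List.map_cons, PySem.Set.ofList_cons, PySem.Set.discard, List.map_cons]
      congr 1
      have hmf : (rest.filter (fun q => !(q.1 == p.1))).map Prod.fst
          = (rest.map Prod.fst).filter (fun y => !(y == p.1)) :=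
        (List.filter_map (f := Prod.fst) (p := fun y => !(y == p.1)) (l := rest)).symm
      rw [hmf, ofList_filter]
      refine List.map_congr_left (fun k hk => ?_)
      have hkne : (k == p.1) = false := by
        have := (List.mem_filter.mp hk).2
        simpa using this
      have hpk : (p.1 == k) = false := by
        refine beq_eq_false_iff_ne.mpr ?_
        intro he; rw [he] at hkne; simp at hkne
      rw [List.filter_cons_of_neg (by simpa using hpk), List.filter_filter]
      congr 2
      exact List.filter_congr (fun q hq => by
        by_cases h : (q.1 == k) = true
        · have : (q.1 == p.1) = false := by
            have : q.1 = k := eq_of_beq h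
            rw [this]; exact hkne
          simp [h, this]
        · simp at h; simp [h])

-- A's branch on membership is exactly Dict.modify (append to the existing list, or start one).
theorem stepA_eq_modify (eg : PySem.Dict String (List String)) (sid id : String) :
    (if eg.contains sid then eg.insert sid (eg.getD sid [] ++ [id]) else eg.insert sid [id])
      = eg.modify sid [] (· ++ [id]) := by
  by_cases h : eg.contains sid = true
  · simp [h, PySem.Dict.modify]
  · simp only [Bool.not_eq_true] at h
    simp [h, PySem.Dict.modify, PySem.Dict.getD_of_not_contains]

-- A characterised: the one-pass dict grouping's items are the distinct keys in
-- first-occurrence order, each paired with all its values in order.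
theorem A_items {β : Type} (l : List β) (key idf : β → String) :
    (l.foldl (fun eg b =>
        if eg.contains (key b) then eg.insert (key b) (eg.getD (key b) [] ++ [idf b])
        else eg.insert (key b) [idf b]) PySem.Dict.empty).items
    = (PySem.Set.ofList (l.map key)).map
        (fun k => (k, (l.filter (fun b => key b == k)).map idf)) := by
  have hA : (l.foldl (fun eg b =>
        if eg.contains (key b) then eg.insert (key b) (eg.getD (key b) [] ++ [idf b])
        else eg.insert (key b) [idf b]) PySem.Dict.empty)
      = l.foldl (fun eg b => eg.modify (key b) [] (· ++ [idf b])) PySem.Dict.empty := by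
    have heq : (fun (eg : PySem.Dict String (List String)) b =>
        if eg.contains (key b) then eg.insert (key b) (eg.getD (key b) [] ++ [idf b])
        else eg.insert (key b) [idf b])
        = fun eg b => eg.modify (key b) [] (· ++ [idf b]) := by
      funext eg b; exact stepA_eq_modify eg (key b) (idf b)
    rw [heq]
  rw [hA]
  set dA := l.foldl (fun eg b => eg.modify (key b) [] (· ++ [idf b])) PySem.Dict.empty with hdA
  have hkeys : dA.keys = PySem.Set.ofList (l.map key) := by
    rw [hdA, PySem.Dict.keys_foldl_modify_key l key [] (fun _ b v => v ++ [idf b])]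
    simp [PySem.Set.update_nil_left]
  have hnodup : dA.keys.Nodup := by
    rw [hkeys]; exact PySem.Set.nodup_ofList _
  have hgetD : ∀ k, dA.getD k [] = (l.filter (fun b => key b == k)).map idf := by
    intro k
    have hmap : dA = (l.map (fun b => (key b, idf b))).foldl
        (fun d p => d.modify p.1 [] (· ++ [p.2])) PySem.Dict.empty := by
      rw [hdA, List.foldl_map]
    rw [hmap, PySem.Dict.getD_foldl_modify_append]
    simp [List.filter_map, Function.comp_def, List.map_map]
  rw [PySem.Dict.items_eq_map_keys dA hnodup []]
  simp only [hgetD, hkeys]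

theorem get_exclusive_groups_eq (blocks : List (List (String × String))) :
    get_exclusive_groups blocks = get_exclusive_groups_alt blocks := by
  unfold get_exclusive_groups get_exclusive_groups_alt
  rw [A_items (blocks.filter (fun b => (PySem.Dict.mk b).getD "type" "" == "C04"))
      (fun b => (PySem.Dict.mk b).getD "special_id" "")
      (fun b => (PySem.Dict.mk b).getD "id" ""),
    pvPeelGroups_eq]
  rw [List.map_map]
  refine List.map_congr_left (fun k _ => ?_)
  congr 1
  rw [List.filter_map, List.map_map]
  rfl

-- ===== VERDICT (by name: the statement is the Claim_ definition above) =====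
theorem get_exclusive_groups_spec : Claim_equal_get_exclusive_groups := by
  intro blocks _ _
  unfold Spec_get_exclusive_groups
  exact get_exclusive_groups_eq blocks
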